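-- pv_equiv track=rewrite | github.com/kartikbansiwal/Project-Flow-Of-Traffic | Flow Of Traffic.py | arrange_edges
-- ===== SOURCE A (Python) =====
-- def arrange_edges(l):
--     for i in range (0,len(l)):
--         tmp=l[i]
--         if l[i][1]<l[i][0]:
--             l[i]=(tmp[1],tmp[0],tmp[2])
--     l=sorted(l)
--     l.append(('F','F','F'))
--     ans=[]
--     for i in range (0,len(l)-1):
--         if l[i+1][1]!=l[i][1] or l[i+1][0]!=l[i][0]:
--             ans.append(l[i])
--     return ans
-- ===== SOURCE B (Python) =====
-- def arrange_edges(l):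
--     for i in range(0, len(l)):
--         tmp = l[i]
--         if l[i][1] < l[i][0]:
--             l[i] = (tmp[1], tmp[0], tmp[2])
--     best = {}
--     for e in l:
--         k = (e[0], e[1])
--         if k not in best or e > best[k]:
--             best[k] = e
--     return sorted(best.values())
-- ===== Notes on version B (the rewrite author's own statement) =====
-- stated objective: idiomatic
-- what changed: Replaces the sort-then-adjacent-scan dedup with its ('F','F','F') sentinel by a single dict pass keeping the maximal tuple per (a,b) key, then sorted(best.values()); the in-place normalization loop is kept byte-for-byte.
-- intended difference: On inputs that contain an ('F','F',*) edge and whose normalized-key maximum is ('F','F') (so the greatest normalized tuple collides with A's sentinel), A silently drops that group's winner from its result while B keeps it; keeping one representative per edge key is clearly the intended behaviour. — e.g. on arrange_edges([("F", "F", "a")]): A returns [], B returns [("F", "F", "a")]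
import Mathlib
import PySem

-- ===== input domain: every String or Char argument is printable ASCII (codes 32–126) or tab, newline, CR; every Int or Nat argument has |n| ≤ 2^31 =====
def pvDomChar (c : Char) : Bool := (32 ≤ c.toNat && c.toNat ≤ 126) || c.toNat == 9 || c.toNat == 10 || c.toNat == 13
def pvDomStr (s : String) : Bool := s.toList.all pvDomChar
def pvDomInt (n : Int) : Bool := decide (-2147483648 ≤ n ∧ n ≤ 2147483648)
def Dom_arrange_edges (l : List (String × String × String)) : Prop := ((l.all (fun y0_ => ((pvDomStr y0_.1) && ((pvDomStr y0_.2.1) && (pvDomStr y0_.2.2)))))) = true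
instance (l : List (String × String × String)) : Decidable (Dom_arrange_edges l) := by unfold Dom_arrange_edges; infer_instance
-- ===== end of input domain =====

-- B replaces A's sort + adjacent-duplicate scan (with its ('F','F','F') sentinel) by a dict
-- keeping the maximal tuple per (a,b) key, then sorts the dict values; the in-place
-- normalization loop (a visible mutation of the caller's list) is kept byte-for-byte in B.
-- Equivalence is about the RETURN value; both Pythons perform the same in-place mutation.

-- Python's tuple comparison (lexicographic, strings by code points = '<' on .toList)
def pvKey (e : String × String × String) : Lex (List Char × Lex (List Char × List Char)) :=
  toLex (e.1.toList, toLex (e.2.1.toList, e.2.2.toList))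

-- ===== PORT A =====
def arrange_edges (l : List (String × String × String)) : List (String × String × String) :=
  -- for i in range(0,len(l)): tmp=l[i]; if l[i][1]<l[i][0]: l[i]=(tmp[1],tmp[0],tmp[2])
  let l1 := l.map (fun tmp => if tmp.2.1.toList < tmp.1.toList then (tmp.2.1, tmp.1, tmp.2.2) else tmp)
  -- l=sorted(l)
  let l2 := PySem.List.sorted l1 pvKey
  -- l.append(('F','F','F'))
  let l3 := l2 ++ [("F", "F", "F")]
  -- for i in range(0,len(l)-1): if l[i+1][1]!=l[i][1] or l[i+1][0]!=l[i][0]: ans.append(l[i])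
  -- (indices i, i+1 are always in range, so pyGetD is exact here)
  (PySem.List.pyRange 0 ((l3.length : Int) - 1) 1).foldl
    (fun ans i =>
      if (PySem.List.pyGetD l3 (i + 1) ("", "", "")).2.1 ≠ (PySem.List.pyGetD l3 i ("", "", "")).2.1
          ∨ (PySem.List.pyGetD l3 (i + 1) ("", "", "")).1 ≠ (PySem.List.pyGetD l3 i ("", "", "")).1
        then ans ++ [PySem.List.pyGetD l3 i ("", "", "")] else ans) []

-- ===== PORT B =====
def arrange_edges_alt (l : List (String × String × String)) : List (String × String × String) :=
  -- same in-place normalization loop as A (Source B keeps it byte-for-byte)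
  let l1 := l.map (fun tmp => if tmp.2.1.toList < tmp.1.toList then (tmp.2.1, tmp.1, tmp.2.2) else tmp)
  -- best = {}; for e in l: k=(e[0],e[1]); if k not in best or e > best[k]: best[k]=e
  let best := l1.foldl
    (fun best e =>
      match best.get? (e.1, e.2.1) with
      | none => best.insert (e.1, e.2.1) e
      | some v => if pvKey v < pvKey e then best.insert (e.1, e.2.1) e else best)
    (PySem.Dict.empty : PySem.Dict (String × String) (String × String × String))
  -- return sorted(best.values())
  PySem.List.sorted best.values pvKey

-- ===== PRECONDITION & SPEC =====
-- On inputs containing an ('F','F',*) edge whose normalized keys are all ≤ ('F','F') (so the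
-- greatest normalized tuple collides with A's sentinel), A silently drops that key's winner
-- from its result while B keeps it; keeping one representative per key is the intended value.
def D_arrange_edges (l : List (String × String × String)) : Prop :=
  (∃ e ∈ l, e.1 = "F" ∧ e.2.1 = "F") ∧
  ∀ e ∈ l, (toLex (min e.1.toList e.2.1.toList, max e.1.toList e.2.1.toList) : Lex (List Char × List Char))
      ≤ toLex ("F".toList, "F".toList)
instance (l : List (String × String × String)) : Decidable (D_arrange_edges l) := by
  unfold D_arrange_edges; infer_instance

def Spec_arrange_edges (l : List (String × String × String)) (out : List (String × String × String)) : Prop :=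
  ¬ D_arrange_edges l → out = arrange_edges_alt l
instance (l : List (String × String × String)) (out : List (String × String × String)) : Decidable (Spec_arrange_edges l out) := by
  unfold Spec_arrange_edges; infer_instance

def pvDiffWitness_arrange_edges : (List (String × String × String)) := [("F", "F", "a")]
def pvDiffWitnessOut_arrange_edges : (List (String × String × String)) × (List (String × String × String)) :=
  ([], [("F", "F", "a")])

-- ===== CLAIM (what is proved, stated in full; the proofs are below) =====
def Claim_unchanged_arrange_edges : Prop := ∀ (l : List (String × String × String)), Dom_arrange_edges l → Spec_arrange_edges l (arrange_edges l)
def Claim_changed_arrange_edges : Prop := Dom_arrange_edges (pvDiffWitness_arrange_edges) ∧ D_arrange_edges (pvDiffWitness_arrange_edges) ∧ arrange_edges (pvDiffWitness_arrange_edges) = pvDiffWitnessOut_arrange_edges.1 ∧ arrange_edges_alt (pvDiffWitness_arrange_edges) = pvDiffWitnessOut_arrange_edges.2 ∧ pvDiffWitnessOut_arrange_edges.1 ≠ pvDiffWitnessOut_arrange_edges.2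
def Claim_exact_arrange_edges : Prop := ∀ (l : List (String × String × String)), Dom_arrange_edges l → D_arrange_edges l → arrange_edges l ≠ arrange_edges_alt l

-- ===== LEMMAS AND PROOFS =====

-- abbreviations for the proofs
def pvK2 (e : String × String × String) : Lex (List Char × List Char) := toLex (e.1.toList, e.2.1.toList)
def pvFFL : Lex (List Char × List Char) := toLex ("F".toList, "F".toList)
def pvNorm (e : String × String × String) : String × String × String :=
  if e.2.1.toList < e.1.toList then (e.2.1, e.1, e.2.2) else e
def pvSent : String × String × String := ("F", "F", "F")

-- A's dedup loop, as a structural recursion over the sorted list (sentinel folded in)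
def pvScan : List (String × String × String) → List (String × String × String)
  | [] => []
  | [x] => if ("F" : String) ≠ x.2.1 ∨ ("F" : String) ≠ x.1 then [x] else []
  | x :: y :: t => (if y.2.1 ≠ x.2.1 ∨ y.1 ≠ x.1 then [x] else []) ++ pvScan (y :: t)

-- keep-last-of-each-key-run dedup (no sentinel)
def pvDL : List (String × String × String) → List (String × String × String)
  | [] => []
  | [x] => [x]
  | x :: y :: t => (if y.2.1 ≠ x.2.1 ∨ y.1 ≠ x.1 then [x] else []) ++ pvDL (y :: t)

-- "x is a maximal element of its (a,b)-key group in m"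
def pvMax (m : List (String × String × String)) (x : String × String × String) : Prop :=
  x ∈ m ∧ ∀ e ∈ m, pvK2 e = pvK2 x → pvKey e ≤ pvKey x

theorem pvKey_inj {a b : String × String × String} (h : pvKey a = pvKey b) : a = b := by
  unfold pvKey at h
  rw [toLex_inj] at h
  obtain ⟨h1, h2⟩ := Prod.mk.injEq .. ▸ h
  rw [toLex_inj] at h2
  obtain ⟨h2, h3⟩ := Prod.mk.injEq .. ▸ h2
  obtain ⟨a1, a2, a3⟩ := a; obtain ⟨b1, b2, b3⟩ := b
  simp only [String.toList_inj] at h1 h2 h3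
  simp [h1, h2, h3]

theorem pvK2_mono {a b : String × String × String} (h : pvKey a ≤ pvKey b) : pvK2 a ≤ pvK2 b := by
  unfold pvKey at h
  unfold pvK2
  rw [Prod.Lex.toLex_le_toLex] at h ⊢
  rcases h with h | ⟨h1, h2⟩
  · exact Or.inl h
  · rw [Prod.Lex.toLex_le_toLex] at h2
    rcases h2 with h2 | ⟨h2, _⟩
    · exact Or.inr ⟨h1, le_of_lt h2⟩
    · exact Or.inr ⟨h1, le_of_eq h2⟩

theorem pvCond_iff (x y : String × String × String) :
    (y.2.1 ≠ x.2.1 ∨ y.1 ≠ x.1) ↔ pvK2 y ≠ pvK2 x := by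
  have : pvK2 y = pvK2 x ↔ (y.1 = x.1 ∧ y.2.1 = x.2.1) := by
    unfold pvK2
    rw [toLex_inj, Prod.mk.injEq, String.toList_inj, String.toList_inj]
  constructor
  · intro hc he
    rw [this] at he
    tauto
  · intro hne
    by_contra hc
    push Not at hc
    exact hne (this.mpr ⟨hc.2, hc.1⟩)

theorem pvK2_norm (e : String × String × String) :
    pvK2 (pvNorm e) = toLex (min e.1.toList e.2.1.toList, max e.1.toList e.2.1.toList) := by
  unfold pvNorm pvK2
  split_ifs with h
  · rw [min_eq_right h.le, max_eq_left h.le]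
  · rw [min_eq_left (not_lt.mp h), max_eq_right (not_lt.mp h)]

-- the index loop of A over s ++ [sentinel] is pvScan s
theorem pvScan_aux (s : List (String × String × String)) :
    ((List.range s.length).filter
        (fun i => decide (((s ++ [pvSent]).getD (i + 1) ("", "", "")).2.1 ≠ ((s ++ [pvSent]).getD i ("", "", "")).2.1
          ∨ ((s ++ [pvSent]).getD (i + 1) ("", "", "")).1 ≠ ((s ++ [pvSent]).getD i ("", "", "")).1))).map
      (fun i => (s ++ [pvSent]).getD i ("", "", "")) = pvScan s := by
  induction s with
  | nil => simp [pvScan]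
  | cons x t ih =>
    cases t with
    | nil =>
      by_cases h : (("F" : String) ≠ x.2.1 ∨ ("F" : String) ≠ x.1)
      · simp [pvScan, pvSent, h]
      · simp [pvScan, pvSent, h]
    | cons y t' =>
      rw [show (x :: y :: t').length = (y :: t').length + 1 from rfl, List.range_succ_eq_map]
      rw [List.filter_cons]
      have hget0 : ((x :: y :: t' ++ [pvSent]).getD 0 ("", "", "")) = x := rfl
      have hget1 : ((x :: y :: t' ++ [pvSent]).getD (0 + 1) ("", "", "")) = y := rfl
      have htail :
          ((List.map Nat.succ (List.range (y :: t').length)).filter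
              (fun i => decide ((((x :: y :: t') ++ [pvSent]).getD (i + 1) ("", "", "")).2.1 ≠ (((x :: y :: t') ++ [pvSent]).getD i ("", "", "")).2.1
                ∨ (((x :: y :: t') ++ [pvSent]).getD (i + 1) ("", "", "")).1 ≠ (((x :: y :: t') ++ [pvSent]).getD i ("", "", "")).1))).map
            (fun i => ((x :: y :: t') ++ [pvSent]).getD i ("", "", "")) = pvScan (y :: t') := by
        rw [List.filter_map, List.map_map]
        exact ih
      by_cases h : (y.2.1 ≠ x.2.1 ∨ y.1 ≠ x.1)
      · rw [if_pos (by simp only [hget0, hget1]; exact decide_eq_true h)]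
        rw [List.map_cons, hget0]
        rw [htail]
        rw [show pvScan (x :: y :: t') = x :: pvScan (y :: t') by simp [pvScan, h]]
      · rw [if_neg (by simp only [hget0, hget1]; exact by simpa using h)]
        rw [htail]
        rw [show pvScan (x :: y :: t') = pvScan (y :: t') by simp [pvScan, h]]

theorem pvLoop_eq_pvScan (s : List (String × String × String)) :
    (PySem.List.pyRange 0 (((s ++ [pvSent]).length : Int) - 1) 1).foldl
      (fun ans i =>
        if (PySem.List.pyGetD (s ++ [pvSent]) (i + 1) ("", "", "")).2.1 ≠ (PySem.List.pyGetD (s ++ [pvSent]) i ("", "", "")).2.1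
            ∨ (PySem.List.pyGetD (s ++ [pvSent]) (i + 1) ("", "", "")).1 ≠ (PySem.List.pyGetD (s ++ [pvSent]) i ("", "", "")).1
          then ans ++ [PySem.List.pyGetD (s ++ [pvSent]) i ("", "", "")] else ans) [] = pvScan s := by
  rw [show (((s ++ [pvSent]).length : Int) - 1) = ((s.length : Nat) : Int) by simp]
  rw [PySem.List.pyRange_zero_natCast]
  rw [PySem.List.foldl_append_ite
    (p := fun i => (PySem.List.pyGetD (s ++ [pvSent]) (i + 1) ("", "", "")).2.1 ≠ (PySem.List.pyGetD (s ++ [pvSent]) i ("", "", "")).2.1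
      ∨ (PySem.List.pyGetD (s ++ [pvSent]) (i + 1) ("", "", "")).1 ≠ (PySem.List.pyGetD (s ++ [pvSent]) i ("", "", "")).1)
    (f := fun i => PySem.List.pyGetD (s ++ [pvSent]) i ("", "", ""))]
  rw [List.filter_map, List.map_map]
  rw [← pvScan_aux s]
  simp only [List.nil_append, Function.comp_def]
  simp only [show ∀ (k : Nat), ((k : Int) + 1) = ((k + 1 : Nat) : Int) from fun k => by push_cast; ring]
  simp only [PySem.List.pyGetD_natCast]

theorem pvScan_eq_pvDL (s : List (String × String × String))
    (h : ∀ x, s.getLast? = some x → (("F" : String) ≠ x.2.1 ∨ ("F" : String) ≠ x.1)) :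
    pvScan s = pvDL s := by
  induction s with
  | nil => rfl
  | cons a t ih =>
    cases t with
    | nil =>
      have := h a rfl
      simp [pvScan, pvDL, this]
    | cons b t' =>
      have ih' := ih (by intro z hz; exact h z (by rw [← hz, List.getLast?_cons_cons]))
      simp only [pvScan, pvDL]
      rw [ih']

theorem pvDL_subset {s x} (hx : x ∈ pvDL s) : x ∈ s := by
  induction s with
  | nil => simp [pvDL] at hx
  | cons a t ih =>
    cases t with
    | nil => simpa [pvDL] using hx
    | cons b t' =>
      simp only [pvDL] at hx
      rcases List.mem_append.mp hx with h1 | h2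
      · split_ifs at h1 with hc
        · rw [List.mem_singleton.mp h1]; exact List.mem_cons_self ..
        · simp at h1
      · exact List.mem_cons_of_mem _ (ih h2)

theorem mem_pvDL {s : List (String × String × String)}
    (hs : s.Pairwise (fun a b => pvKey a ≤ pvKey b)) (x : String × String × String) :
    x ∈ pvDL s ↔ pvMax s x := by
  induction s with
  | nil => simp [pvDL, pvMax]
  | cons a t ih =>
    cases t with
    | nil =>
      rw [show pvDL [a] = [a] from rfl]
      unfold pvMax
      constructor
      · intro hx
        rw [List.mem_singleton] at hx
        subst hx
        exact ⟨List.mem_singleton_self x, by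
          intro e he hk
          rw [List.mem_singleton] at he
          subst he
          exact le_refl _⟩
      · exact fun h => h.1
    | cons b t' =>
      have hab : pvKey a ≤ pvKey b := (List.pairwise_cons.mp hs).1 b (List.mem_cons_self ..)
      have ha_all : ∀ e ∈ b :: t', pvKey a ≤ pvKey e := (List.pairwise_cons.mp hs).1
      have hs' : (b :: t').Pairwise (fun a b => pvKey a ≤ pvKey b) := (List.pairwise_cons.mp hs).2
      by_cases hk : pvK2 b = pvK2 a
      · have hcond : ¬ (b.2.1 ≠ a.2.1 ∨ b.1 ≠ a.1) := by rw [pvCond_iff]; simpa using hk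
        rw [show pvDL (a :: b :: t') = pvDL (b :: t') by simp [pvDL, hcond]]
        rw [ih hs']
        unfold pvMax
        constructor
        · rintro ⟨hmem, hmax⟩
          refine ⟨List.mem_cons_of_mem _ hmem, ?_⟩
          intro e he hke
          rcases List.mem_cons.mp he with rfl | he'
          · exact le_trans hab (hmax b (List.mem_cons_self ..) (hk.trans hke))
          · exact hmax e he' hke
        · rintro ⟨hmem, hmax⟩
          rcases List.mem_cons.mp hmem with rfl | hmem'
          · have h1 : pvKey b ≤ pvKey x :=
              hmax b (List.mem_cons_of_mem _ (List.mem_cons_self ..)) hk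
            have hba : b = x := pvKey_inj (le_antisymm h1 hab)
            exact ⟨by rw [← hba]; exact List.mem_cons_self .., by
              intro e he hke
              exact hmax e (List.mem_cons_of_mem _ he) hke⟩
          · exact ⟨hmem', fun e he hke => hmax e (List.mem_cons_of_mem _ he) hke⟩
      · have hcond : (b.2.1 ≠ a.2.1 ∨ b.1 ≠ a.1) := (pvCond_iff a b).mpr hk
        rw [show pvDL (a :: b :: t') = a :: pvDL (b :: t') by simp [pvDL, hcond]]
        rw [List.mem_cons, ih hs']
        unfold pvMax
        constructor
        · rintro (rfl | ⟨hmem, hmax⟩)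
          · refine ⟨List.mem_cons_self .., ?_⟩
            intro e he hke
            rcases List.mem_cons.mp he with rfl | he'
            · exact le_refl _
            · exfalso
              rcases List.mem_cons.mp he' with rfl | he''
              · exact hk hke
              · have h1 : pvK2 x ≤ pvK2 b := pvK2_mono hab
                have h2 : pvK2 b ≤ pvK2 e := pvK2_mono ((List.pairwise_cons.mp hs').1 e he'')
                rw [hke] at h2
                exact hk (le_antisymm h2 h1)
          · refine ⟨List.mem_cons_of_mem _ hmem, ?_⟩
            intro e he hke
            rcases List.mem_cons.mp he with rfl | he'
            · exact le_trans (le_refl _) (ha_all x hmem)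
            · exact hmax e he' hke
        · rintro ⟨hmem, hmax⟩
          rcases List.mem_cons.mp hmem with rfl | hmem'
          · exact Or.inl rfl
          · exact Or.inr ⟨hmem', fun e he hke => hmax e (List.mem_cons_of_mem _ he) hke⟩

theorem pairwise_pvDL {s : List (String × String × String)}
    (hs : s.Pairwise (fun a b => pvKey a ≤ pvKey b)) :
    (pvDL s).Pairwise (fun a b => pvKey a < pvKey b) := by
  induction s with
  | nil => simp [pvDL]
  | cons a t ih =>
    cases t with
    | nil => simp [pvDL]
    | cons b t' =>
      have hab : pvKey a ≤ pvKey b := (List.pairwise_cons.mp hs).1 b (List.mem_cons_self ..)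
      have ha_all : ∀ e ∈ b :: t', pvKey a ≤ pvKey e := (List.pairwise_cons.mp hs).1
      have hs' : (b :: t').Pairwise (fun a b => pvKey a ≤ pvKey b) := (List.pairwise_cons.mp hs).2
      by_cases hk : pvK2 b = pvK2 a
      · have hcond : ¬ (b.2.1 ≠ a.2.1 ∨ b.1 ≠ a.1) := by rw [pvCond_iff]; simpa using hk
        rw [show pvDL (a :: b :: t') = pvDL (b :: t') by simp [pvDL, hcond]]
        exact ih hs'
      · have hcond : (b.2.1 ≠ a.2.1 ∨ b.1 ≠ a.1) := (pvCond_iff a b).mpr hk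
        rw [show pvDL (a :: b :: t') = a :: pvDL (b :: t') by simp [pvDL, hcond]]
        refine List.pairwise_cons.mpr ⟨?_, ih hs'⟩
        intro z hz
        have hz' : z ∈ b :: t' := pvDL_subset hz
        have hle : pvKey a ≤ pvKey z := ha_all z hz'
        refine lt_of_le_of_ne hle ?_
        intro heq
        have hxz : a = z := pvKey_inj heq
        subst hxz
        rcases List.mem_cons.mp hz' with rfl | hz''
        · exact hk rfl
        · have h1 : pvK2 a ≤ pvK2 b := pvK2_mono hab
          have h2 : pvK2 b ≤ pvK2 a := pvK2_mono ((List.pairwise_cons.mp hs').1 a hz'')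
          exact hk (le_antisymm h2 h1)

-- ===== B-side: the dict fold keeps exactly the maximal element of each key group =====
def pvStep (best : PySem.Dict (String × String) (String × String × String))
    (e : String × String × String) : PySem.Dict (String × String) (String × String × String) :=
  match best.get? (e.1, e.2.1) with
  | none => best.insert (e.1, e.2.1) e
  | some v => if pvKey v < pvKey e then best.insert (e.1, e.2.1) e else best

def pvKeyS (e : String × String × String) : String × String := (e.1, e.2.1)

theorem pvKeyS_iff {e x : String × String × String} : pvKeyS e = pvKeyS x ↔ pvK2 e = pvK2 x := by
  unfold pvKeyS pvK2
  rw [toLex_inj, Prod.mk.injEq, Prod.mk.injEq, String.toList_inj, String.toList_inj]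

def pvInv (d : PySem.Dict (String × String) (String × String × String))
    (p : List (String × String × String)) : Prop :=
  d.keys.Nodup ∧ ∀ k : String × String,
    (d.get? k = none → ∀ e ∈ p, pvKeyS e ≠ k) ∧
    (∀ v, d.get? k = some v → v ∈ p ∧ pvKeyS v = k ∧ ∀ e ∈ p, pvKeyS e = k → pvKey e ≤ pvKey v)

theorem pvInv_step (d : PySem.Dict (String × String) (String × String × String)) (p : List (String × String × String))
    (e : String × String × String) (h : pvInv d p) : pvInv (pvStep d e) (p ++ [e]) := by
  obtain ⟨hnd, hk⟩ := h
  unfold pvStep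
  cases hg : d.get? (e.1, e.2.1) with
  | none =>
    refine ⟨PySem.Dict.nodup_keys_insert _ _ _ hnd, ?_⟩
    intro k
    rw [PySem.Dict.get?_insert] at *
    constructor
    · intro hnone e' he'
      split_ifs at hnone with heq
      rcases List.mem_append.mp he' with h1 | h2
      · exact (hk k).1 hnone e' h1
      · rw [List.mem_singleton.mp h2]
        exact fun hh => heq hh.symm
    · intro v hv
      split_ifs at hv with heq
      · obtain rfl : e = v := by injection hv
        refine ⟨List.mem_append_right _ (List.mem_singleton_self _), heq ▸ rfl, ?_⟩
        intro e' he' hke'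
        rcases List.mem_append.mp he' with h1 | h2
        · exact absurd hke' ((hk k).1 (heq ▸ hg) e' h1)
        · rw [List.mem_singleton.mp h2]
      · obtain ⟨h1, h2, h3⟩ := (hk k).2 v hv
        refine ⟨List.mem_append_left _ h1, h2, ?_⟩
        intro e' he' hke'
        rcases List.mem_append.mp he' with h4 | h5
        · exact h3 e' h4 hke'
        · rw [List.mem_singleton.mp h5] at hke'
          exact absurd hke' (by unfold pvKeyS; exact fun hh => heq hh.symm)
  | some v0 =>
    change pvInv (if pvKey v0 < pvKey e then d.insert (e.1, e.2.1) e else d) (p ++ [e])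
    by_cases hlt : pvKey v0 < pvKey e
    · rw [if_pos hlt]
      refine ⟨PySem.Dict.nodup_keys_insert _ _ _ hnd, ?_⟩
      intro k
      rw [PySem.Dict.get?_insert]
      constructor
      · intro hnone e' he'
        split_ifs at hnone with heq
        rcases List.mem_append.mp he' with h1 | h2
        · exact (hk k).1 hnone e' h1
        · rw [List.mem_singleton.mp h2]
          exact fun hh => heq hh.symm
      · intro v hv
        split_ifs at hv with heq
        · obtain rfl : e = v := by injection hv
          refine ⟨List.mem_append_right _ (List.mem_singleton_self _), heq ▸ rfl, ?_⟩
          intro e' he' hke'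
          rcases List.mem_append.mp he' with h1 | h2
          · have h3 := ((hk k).2 v0 (heq ▸ hg)).2.2 e' h1 hke'
            exact le_trans h3 (le_of_lt hlt)
          · rw [List.mem_singleton.mp h2]
        · obtain ⟨h1, h2, h3⟩ := (hk k).2 v hv
          refine ⟨List.mem_append_left _ h1, h2, ?_⟩
          intro e' he' hke'
          rcases List.mem_append.mp he' with h4 | h5
          · exact h3 e' h4 hke'
          · rw [List.mem_singleton.mp h5] at hke'
            exact absurd hke' (by unfold pvKeyS; exact fun hh => heq hh.symm)
    · rw [if_neg hlt]
      refine ⟨hnd, ?_⟩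
      intro k
      constructor
      · intro hnone e' he'
        rcases List.mem_append.mp he' with h1 | h2
        · exact (hk k).1 hnone e' h1
        · rw [List.mem_singleton.mp h2]
          intro hke
          rw [show pvKeyS e = (e.1, e.2.1) from rfl] at hke
          rw [hke] at hg
          rw [hg] at hnone
          simp at hnone
      · intro v hv
        obtain ⟨h1, h2, h3⟩ := (hk k).2 v hv
        refine ⟨List.mem_append_left _ h1, h2, ?_⟩
        intro e' he' hke'
        rcases List.mem_append.mp he' with h4 | h5
        · exact h3 e' h4 hke'
        · rw [List.mem_singleton.mp h5] at hke' ⊢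
          rw [show pvKeyS e = (e.1, e.2.1) from rfl] at hke'
          rw [hke'] at hg
          rw [hg] at hv
          obtain rfl : v0 = v := by injection hv
          exact not_lt.mp hlt

theorem pvInv_foldl (m : List (String × String × String)) :
    ∀ (d : PySem.Dict (String × String) (String × String × String)) (p : List (String × String × String)),
      pvInv d p → pvInv (m.foldl pvStep d) (p ++ m) := by
  induction m with
  | nil => intro d p h; simpa using h
  | cons e m' ih =>
    intro d p h
    rw [List.foldl_cons, show p ++ e :: m' = (p ++ [e]) ++ m' by simp]
    exact ih _ _ (pvInv_step d p e h)

theorem pvInv_main (m : List (String × String × String)) :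
    pvInv (m.foldl pvStep PySem.Dict.empty) m := by
  have h0 : pvInv (PySem.Dict.empty : PySem.Dict (String × String) (String × String × String)) [] := by
    refine ⟨PySem.Dict.nodup_keys_empty, ?_⟩
    intro k
    constructor
    · intro _ e he; exact absurd he (List.not_mem_nil)
    · intro v hv
      rw [PySem.Dict.get?_empty] at hv
      simp at hv
  simpa using pvInv_foldl m PySem.Dict.empty [] h0

theorem pvMem_keys_some (d : PySem.Dict (String × String) (String × String × String))
    (k : String × String) (hmem : k ∈ d.keys) :
    ∃ v, d.get? k = some v := by
  cases hv : d.get? k with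
  | none => exact absurd hmem ((PySem.Dict.get?_eq_none_iff_not_mem_keys d k).mp hv)
  | some v => exact ⟨v, rfl⟩

theorem pvValues_mem (m : List (String × String × String)) (x : String × String × String) :
    x ∈ (m.foldl pvStep PySem.Dict.empty).values ↔ pvMax m x := by
  obtain ⟨hnd, hk⟩ := pvInv_main m
  rw [PySem.Dict.values_eq_map_keys _ hnd ("", "", "")]
  constructor
  · intro hx
    obtain ⟨k, hkmem, hgd⟩ := List.mem_map.mp hx
    obtain ⟨v, hv⟩ := pvMem_keys_some _ k hkmem
    have hxv : x = v := by rw [← hgd, PySem.Dict.getD_of_get?_eq_some _ _ hv]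
    subst hxv
    obtain ⟨h1, h2, h3⟩ := (hk k).2 x hv
    exact ⟨h1, fun e he hke => h3 e he ((pvKeyS_iff.mpr hke).trans h2)⟩
  · intro ⟨hmem, hmax⟩
    cases hv : (m.foldl pvStep PySem.Dict.empty).get? (pvKeyS x) with
    | none => exact absurd rfl ((hk (pvKeyS x)).1 hv x hmem)
    | some v =>
      obtain ⟨h1, h2, h3⟩ := (hk (pvKeyS x)).2 v hv
      have hvx : v = x := by
        have ha : pvKey v ≤ pvKey x := hmax v h1 (pvKeyS_iff.mp h2)
        have hb : pvKey x ≤ pvKey v := h3 x hmem rfl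
        exact pvKey_inj (le_antisymm ha hb)
      subst hvx
      refine List.mem_map.mpr ⟨pvKeyS v, ?_, PySem.Dict.getD_of_get?_eq_some _ _ hv⟩
      by_contra hnk
      rw [(PySem.Dict.get?_eq_none_iff_not_mem_keys _ _).mpr hnk] at hv
      simp at hv

theorem pvValues_nodup (m : List (String × String × String)) :
    (m.foldl pvStep PySem.Dict.empty).values.Nodup := by
  obtain ⟨hnd, hk⟩ := pvInv_main m
  rw [PySem.Dict.values_eq_map_keys _ hnd ("", "", "")]
  refine List.Nodup.map_on ?_ hnd
  intro k1 hk1 k2 hk2 hfe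
  obtain ⟨v1, hv1⟩ := pvMem_keys_some _ k1 hk1
  obtain ⟨v2, hv2⟩ := pvMem_keys_some _ k2 hk2
  rw [PySem.Dict.getD_of_get?_eq_some _ _ hv1, PySem.Dict.getD_of_get?_eq_some _ _ hv2] at hfe
  subst hfe
  rw [← ((hk k1).2 v1 hv1).2.1, ← ((hk k2).2 v1 hv2).2.1]

-- ===== assembly =====
theorem pvLast_max {s : List (String × String × String)}
    (hs : s.Pairwise (fun a b => pvKey a ≤ pvKey b)) {x : String × String × String}
    (hx : s.getLast? = some x) : ∀ z ∈ s, pvKey z ≤ pvKey x := by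
  induction s with
  | nil => simp at hx
  | cons a t ih =>
    cases t with
    | nil =>
      obtain rfl : a = x := by simpa using hx
      intro z hz
      rw [List.mem_singleton.mp hz]
    | cons b t' =>
      rw [List.getLast?_cons_cons] at hx
      have hxin : x ∈ b :: t' := List.mem_of_getLast? hx
      intro z hz
      rcases List.mem_cons.mp hz with rfl | hz'
      · exact (List.pairwise_cons.mp hs).1 x hxin
      · exact ih (List.pairwise_cons.mp hs).2 hx z hz'

theorem pvA_eq (l : List (String × String × String)) :
    arrange_edges l = pvScan (PySem.List.sorted (l.map pvNorm) pvKey) :=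
  pvLoop_eq_pvScan _

theorem pvB_eq (l : List (String × String × String)) :
    arrange_edges_alt l = pvDL (PySem.List.sorted (l.map pvNorm) pvKey) := by
  have hstart : arrange_edges_alt l
      = PySem.List.sorted ((l.map pvNorm).foldl pvStep PySem.Dict.empty).values pvKey := rfl
  rw [hstart]
  have hpair := PySem.List.sorted_pairwise (l.map pvNorm) pvKey
  have hperm : (PySem.List.sorted (l.map pvNorm) pvKey).Perm (l.map pvNorm) :=
    PySem.List.sorted_perm (l.map pvNorm) pvKey false
  have hlt := pairwise_pvDL hpair
  refine PySem.List.sorted_eq_of_perm_of_pairwise_lt _ _ pvKey ?_ hlt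
  refine (List.perm_ext_iff_of_nodup ?_ ?_).mpr ?_
  · exact (pairwise_pvDL hpair).imp (fun {a b} hab => by
      intro heq; subst heq; exact lt_irrefl _ hab)
  · exact pvValues_nodup (l.map pvNorm)
  · intro a
    rw [mem_pvDL hpair a, pvValues_mem (l.map pvNorm) a]
    unfold pvMax
    rw [hperm.mem_iff]
    constructor
    · rintro ⟨h1, h2⟩
      exact ⟨h1, fun e he hke => h2 e (hperm.mem_iff.mpr he) hke⟩
    · rintro ⟨h1, h2⟩
      exact ⟨h1, fun e he hke => h2 e (hperm.mem_iff.mp he) hke⟩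

theorem pvK2_norm_FF {e : String × String × String} (h1 : e.1 = "F") (h2 : e.2.1 = "F") :
    pvK2 (pvNorm e) = pvFFL := by
  rw [pvK2_norm, h1, h2]
  simp [pvFFL]

theorem pvScan_no_FF {s : List (String × String × String)}
    (hs : s.Pairwise (fun a b => pvKey a ≤ pvKey b))
    (hall : ∀ e ∈ s, pvK2 e ≤ pvFFL) :
    ∀ z ∈ pvScan s, pvK2 z ≠ pvFFL := by
  induction s with
  | nil => simp [pvScan]
  | cons a t ih =>
    cases t with
    | nil =>
      intro z hz
      simp only [pvScan] at hz
      split_ifs at hz with hc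
      · rw [List.mem_singleton.mp hz]
        have := (pvCond_iff a pvSent).mp hc
        intro heq
        exact this (by rw [show pvK2 pvSent = pvFFL from rfl, heq])
      · simp at hz
    | cons b t' =>
      intro z hz
      simp only [pvScan] at hz
      rcases List.mem_append.mp hz with h1 | h2
      · split_ifs at h1 with hc
        · rw [List.mem_singleton.mp h1]
          intro heq
          have hk := (pvCond_iff a b).mp hc
          have hab : pvKey a ≤ pvKey b := (List.pairwise_cons.mp hs).1 b (List.mem_cons_self ..)
          have h3 : pvK2 a ≤ pvK2 b := pvK2_mono hab
          have h4 : pvK2 b ≤ pvFFL := hall b (List.mem_cons_of_mem _ (List.mem_cons_self ..))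
          rw [heq] at h3
          exact hk ((le_antisymm h4 h3).trans heq.symm)
        · simp at h1
      · exact ih (List.pairwise_cons.mp hs).2
          (fun e he => hall e (List.mem_cons_of_mem _ he)) z h2

-- ===== VERDICT (by name: the statement is the Claim_ definition above) =====
theorem arrange_edges_spec : Claim_unchanged_arrange_edges := by
  intro l _hdom hD
  rw [pvA_eq, pvB_eq]
  have hpair := PySem.List.sorted_pairwise (l.map pvNorm) pvKey
  have hperm : (PySem.List.sorted (l.map pvNorm) pvKey).Perm (l.map pvNorm) :=
    PySem.List.sorted_perm (l.map pvNorm) pvKey false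
  apply pvScan_eq_pvDL
  intro x hx
  by_contra hc
  push Not at hc
  obtain ⟨hc1, hc2⟩ := hc
  have hxs := List.mem_of_getLast? hx
  have hxm : x ∈ l.map pvNorm := hperm.subset hxs
  obtain ⟨e0, he0, hxe⟩ := List.mem_map.mp hxm
  have hFF : e0.1 = "F" ∧ e0.2.1 = "F" := by
    unfold pvNorm at hxe
    split_ifs at hxe with hsw
    · subst hxe; exact ⟨hc1.symm, hc2.symm⟩
    · subst hxe; exact ⟨hc2.symm, hc1.symm⟩
  have hQ : ¬ (∀ e ∈ l, (toLex (min e.1.toList e.2.1.toList, max e.1.toList e.2.1.toList) : Lex (List Char × List Char)) ≤ toLex ("F".toList, "F".toList)) := by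
    intro hq
    exact hD ⟨⟨e0, he0, hFF.1, hFF.2⟩, hq⟩
  push Not at hQ
  obtain ⟨e1, he1, hgt⟩ := hQ
  have hgt' : pvFFL < pvK2 (pvNorm e1) := by
    rw [pvK2_norm]
    exact hgt
  have h1 : pvNorm e1 ∈ PySem.List.sorted (l.map pvNorm) pvKey :=
    hperm.mem_iff.mpr (List.mem_map_of_mem he1)
  have h3 : pvK2 (pvNorm e1) ≤ pvK2 x := pvK2_mono (pvLast_max hpair hx _ h1)
  have h4 : pvK2 x = pvFFL := by
    unfold pvK2 pvFFL
    rw [← hc1, ← hc2]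
  rw [h4] at h3
  exact absurd (lt_of_lt_of_le hgt' h3) (lt_irrefl _)

theorem arrange_edges_changed : Claim_changed_arrange_edges := by
  unfold Claim_changed_arrange_edges; decide

theorem arrange_edges_tight : Claim_exact_arrange_edges := by
  intro l _hdom hd heq
  obtain ⟨⟨e0, he0, hF1, hF2⟩, hall⟩ := hd
  have hpair := PySem.List.sorted_pairwise (l.map pvNorm) pvKey
  have hperm : (PySem.List.sorted (l.map pvNorm) pvKey).Perm (l.map pvNorm) :=
    PySem.List.sorted_perm (l.map pvNorm) pvKey false
  have halls : ∀ e ∈ PySem.List.sorted (l.map pvNorm) pvKey, pvK2 e ≤ pvFFL := by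
    intro e he
    obtain ⟨e', he', rfl⟩ := List.mem_map.mp (hperm.subset he)
    rw [pvK2_norm]
    exact hall e' he'
  have hn0 : pvNorm e0 ∈ PySem.List.sorted (l.map pvNorm) pvKey :=
    hperm.mem_iff.mpr (List.mem_map_of_mem he0)
  have hne : PySem.List.sorted (l.map pvNorm) pvKey ≠ [] := by
    intro h0
    rw [h0] at hn0
    exact absurd hn0 (List.not_mem_nil)
  obtain ⟨x, hx⟩ : ∃ x, (PySem.List.sorted (l.map pvNorm) pvKey).getLast? = some x := by
    cases hgl : (PySem.List.sorted (l.map pvNorm) pvKey).getLast? with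
    | none => exact absurd (List.getLast?_eq_none_iff.mp hgl) hne
    | some x => exact ⟨x, rfl⟩
  have hmax := pvLast_max hpair hx
  have hxk : pvK2 x = pvFFL := by
    refine le_antisymm (halls x (List.mem_of_getLast? hx)) ?_
    have h2 := pvK2_mono (hmax _ hn0)
    rw [pvK2_norm_FF hF1 hF2] at h2
    exact h2
  have hxdl : x ∈ pvDL (PySem.List.sorted (l.map pvNorm) pvKey) :=
    (mem_pvDL hpair x).mpr ⟨List.mem_of_getLast? hx, fun e he _ => hmax e he⟩
  rw [pvA_eq, pvB_eq] at heq
  exact pvScan_no_FF hpair halls x (heq ▸ hxdl) hxk
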